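-- pv_equiv track=rewrite | github.com/SidoJain/AOC-2025 | d1p1.py | safe_password
-- ===== SOURCE A (Python) =====
-- def safe_password(rotations: list[tuple[str, int]], start: int = 50) -> int:
--     pos = start
--     zeros = 0
--     for dir, dist in rotations:
--         if dir == "L":
--             pos = (pos - dist) % 100
--         else:
--             pos = (pos + dist) % 100
--         if pos == 0:
--             zeros += 1
--     return zeros
-- ===== SOURCE B (Python) =====
-- def safe_password(rotations: list[tuple[str, int]], start: int = 50) -> int:
--     # Divide and conquer: count zero-hits in each half independently.
--     # The right half's starting position is (start + signed shift of the left
--     # half) % 100, since each rotation only adds/subtracts mod 100.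
--     n = len(rotations)
--     if n == 0:
--         return 0
--     if n == 1:
--         d, dist = rotations[0]
--         pos = (start - dist) % 100 if d == "L" else (start + dist) % 100
--         return 1 if pos == 0 else 0
--     mid = n // 2
--     left, right = rotations[:mid], rotations[mid:]
--     lshift = sum(-dist if d == "L" else dist for d, dist in left)
--     return safe_password(left, start) + safe_password(right, (start + lshift) % 100)
-- ===== Notes on version B (the rewrite author's own statement) =====
-- stated objective: alternative
-- what changed: B replaces A's fused left-to-right update-and-count loop with a divide-and-conquer recursion: split the rotation list in half, count zero-hits in each half independently, and re-base the right half's start position via the left half's total signed shift mod 100.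
import Mathlib
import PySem

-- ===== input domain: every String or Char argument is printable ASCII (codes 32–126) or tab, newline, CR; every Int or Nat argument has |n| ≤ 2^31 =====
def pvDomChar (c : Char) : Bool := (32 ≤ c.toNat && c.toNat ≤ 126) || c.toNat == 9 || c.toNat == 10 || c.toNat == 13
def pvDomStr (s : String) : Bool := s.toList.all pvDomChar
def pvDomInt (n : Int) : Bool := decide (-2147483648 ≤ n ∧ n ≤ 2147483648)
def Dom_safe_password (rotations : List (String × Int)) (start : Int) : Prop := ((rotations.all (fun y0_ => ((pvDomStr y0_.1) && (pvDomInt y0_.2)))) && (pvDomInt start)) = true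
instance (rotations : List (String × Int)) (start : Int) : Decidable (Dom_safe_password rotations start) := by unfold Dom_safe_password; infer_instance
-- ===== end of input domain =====

-- B replaces A's fused update-and-count loop with a divide-and-conquer recursion: halve the list,
-- count zero-hits in each half, re-basing the right half's start by the left half's shift (alternative).


-- ===== PORT A =====
-- A's loop body: update pos mod 100, bump zeros when pos hits 0
def pvAStep (st : Int × Int) (p : String × Int) : Int × Int :=
  let pos := if p.1 == "L" then PySem.Int.mod (st.1 - p.2) 100 else PySem.Int.mod (st.1 + p.2) 100
  (pos, if pos == 0 then st.2 + 1 else st.2)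

def safe_password (rotations : List (String × Int)) (start : Int) : Int :=
  (rotations.foldl pvAStep (start, 0)).2

-- ===== PORT B =====
-- divide and conquer: n == 0 / n == 1 base cases, else split at mid = n // 2
-- (Python's n // 2 on the non-negative length is Lean's Nat division)
def safe_password_alt (rotations : List (String × Int)) (start : Int) : Int :=
  match rotations with
  | [] => 0
  | [p] =>
    let pos := if p.1 == "L" then PySem.Int.mod (start - p.2) 100
               else PySem.Int.mod (start + p.2) 100
    if pos == 0 then 1 else 0
  | p :: q :: rest =>
    let mid := (p :: q :: rest).length / 2
    let left := (p :: q :: rest).take mid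
    let right := (p :: q :: rest).drop mid
    -- sum of the signed deltas of the left half
    let lshift := left.foldl (fun acc r => acc + (if r.1 == "L" then -r.2 else r.2)) 0
    safe_password_alt left start
      + safe_password_alt right (PySem.Int.mod (start + lshift) 100)
termination_by rotations.length
decreasing_by
  · simp [List.length_take]; omega
  · simp [List.length_drop]; omega

-- ===== PRECONDITION & SPEC =====
def Spec_safe_password (rotations : List (String × Int)) (start : Int) (out : Int) : Prop := out = safe_password_alt rotations start
instance (rotations : List (String × Int)) (start : Int) (out : Int) : Decidable (Spec_safe_password rotations start out) := by unfold Spec_safe_password; infer_instance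

-- ===== CLAIM (what is proved, stated in full; the proofs are below) =====
def Claim_equal_safe_password : Prop := ∀ (rotations : List (String × Int)) (start : Int), Dom_safe_password rotations start → Spec_safe_password rotations start (safe_password rotations start)

-- ===== LEMMAS AND PROOFS =====

-- signed delta of a rotation
def pvDelta (r : String × Int) : Int := if r.1 == "L" then -r.2 else r.2

-- A's zero count from position pos
def pvAcnt (l : List (String × Int)) (pos : Int) : Int := (l.foldl pvAStep (pos, 0)).2

lemma pvMod_congr (x y : Int) (h : PySem.Int.mod x 100 = PySem.Int.mod y 100) (a : Int) :
    PySem.Int.mod (x + a) 100 = PySem.Int.mod (y + a) 100 := by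
  simp only [PySem.Int.mod_eq_emod_of_pos (by norm_num : (0:Int) < 100)] at h ⊢
  omega

lemma pvMod_idem (x : Int) : PySem.Int.mod (PySem.Int.mod x 100) 100 = PySem.Int.mod x 100 := by
  simp only [PySem.Int.mod_eq_emod_of_pos (by norm_num : (0:Int) < 100)]
  omega

lemma pvAStep_fst (st : Int × Int) (r : String × Int) :
    (pvAStep st r).1 = PySem.Int.mod (st.1 + pvDelta r) 100 := by
  simp only [pvAStep, pvDelta]
  split_ifs with h <;> simp [sub_eq_add_neg]

lemma pvAStep_snd (st : Int × Int) (r : String × Int) :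
    (pvAStep st r).2 = if (pvAStep st r).1 == 0 then st.2 + 1 else st.2 := by
  simp [pvAStep]

-- count additivity in the accumulator
lemma pvAcnt_acc (l : List (String × Int)) (pos z : Int) :
    (l.foldl pvAStep (pos, z)).2 = z + pvAcnt l pos := by
  induction l generalizing pos z with
  | nil => simp [pvAcnt]
  | cons r t ih =>
    simp only [pvAcnt, List.foldl_cons]
    rw [show (pvAStep (pos, z) r) = ((pvAStep (pos, z) r).1, (pvAStep (pos, z) r).2) from rfl,
        pvAStep_snd (pos, z) r, ih, ih ((pvAStep (pos, 0) r).1)]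
    have h1 : (pvAStep (pos, z) r).1 = (pvAStep (pos, 0) r).1 := by
      simp [pvAStep]
    rw [h1, pvAStep_snd (pos, 0) r]
    split_ifs <;> omega

-- sum of the signed deltas, recursion-friendly
def pvShiftSum : List (String × Int) → Int
  | [] => 0
  | r :: t => pvDelta r + pvShiftSum t

lemma pvShift_foldl (l : List (String × Int)) (a : Int) :
    l.foldl (fun acc r => acc + (if r.1 == "L" then -r.2 else r.2)) a
      = a + l.foldl (fun acc r => acc + (if r.1 == "L" then -r.2 else r.2)) 0 := by
  induction l generalizing a with
  | nil => simp
  | cons r t ih => simp only [List.foldl_cons]; rw [ih, ih (0 + _)]; ring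

lemma pvShiftSum_eq_foldl (l : List (String × Int)) :
    l.foldl (fun acc r => acc + (if r.1 == "L" then -r.2 else r.2)) 0 = pvShiftSum l := by
  induction l with
  | nil => rfl
  | cons r t ih =>
    simp only [List.foldl_cons, pvShiftSum]
    rw [pvShift_foldl, ih, pvDelta]
    ring_nf

-- A's end position after a nonempty list
lemma pvEnd_pos (l : List (String × Int)) (pos z : Int) (hne : l ≠ []) :
    (l.foldl pvAStep (pos, z)).1 = PySem.Int.mod (pos + pvShiftSum l) 100 := by
  induction l generalizing pos z with
  | nil => exact absurd rfl hne
  | cons r t ih =>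
    have h1 : List.foldl pvAStep (pos, z) (r :: t)
        = List.foldl pvAStep ((pvAStep (pos, z) r).1, (pvAStep (pos, z) r).2) t := rfl
    rcases t with _ | ⟨r2, t2⟩
    · rw [h1]
      simp only [List.foldl_nil, pvAStep_fst, pvShiftSum]
      congr 1
      ring
    · rw [h1, ih _ _ (by simp), pvAStep_fst]
      have h2 := pvMod_congr (PySem.Int.mod (pos + pvDelta r) 100) (pos + pvDelta r)
        (pvMod_idem _) (pvShiftSum (r2 :: t2))
      rw [h2]
      show PySem.Int.mod _ 100 = PySem.Int.mod (pos + pvShiftSum (r :: r2 :: t2)) 100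
      simp only [pvShiftSum]
      congr 1
      ring

-- A's count splits over append, re-based at the left end position
lemma pvAcnt_append (l₁ l₂ : List (String × Int)) (pos : Int) :
    pvAcnt (l₁ ++ l₂) pos = pvAcnt l₁ pos + pvAcnt l₂ (l₁.foldl pvAStep (pos, 0)).1 := by
  simp only [pvAcnt, List.foldl_append]
  rw [show (l₁.foldl pvAStep (pos, 0)) = ((l₁.foldl pvAStep (pos, 0)).1, (l₁.foldl pvAStep (pos, 0)).2) from rfl]
  rw [pvAcnt_acc]
  rfl

-- main: B equals A's count, by strong induction on the length
lemma pvMain : ∀ (n : Nat) (l : List (String × Int)), l.length ≤ n →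
    ∀ (start : Int), safe_password_alt l start = pvAcnt l start := by
  intro n
  induction n with
  | zero =>
    intro l hl start
    rw [List.length_eq_zero_iff.mp (Nat.le_zero.mp hl)]
    simp [safe_password_alt, pvAcnt]
  | succ m ih =>
    intro l hl start
    match l with
    | [] => simp [safe_password_alt, pvAcnt]
    | [p] =>
      simp only [safe_password_alt, pvAcnt, List.foldl_cons, List.foldl_nil, pvAStep_snd]
      rw [pvAStep_fst]
      simp only [pvDelta, PySem.Int.mod_eq_emod_of_pos (by norm_num : (0:Int) < 100)]
      by_cases hL : p.1 == "L" <;> simp only [hL, Bool.false_eq_true, if_true, if_false] <;>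
        split_ifs <;> simp_all <;> omega
    | p :: q :: rest =>
      rw [safe_password_alt]
      have hmidlen : ((p :: q :: rest).take ((p :: q :: rest).length / 2)).length ≤ m := by
        simp only [List.length_take, List.length_cons] at *
        omega
      have hdroplen : ((p :: q :: rest).drop ((p :: q :: rest).length / 2)).length ≤ m := by
        simp only [List.length_drop, List.length_cons] at *
        omega
      rw [ih _ hmidlen, ih _ hdroplen]
      have hsplit := List.take_append_drop ((p :: q :: rest).length / 2) (p :: q :: rest)
      conv_rhs => rw [← hsplit]
      rw [pvAcnt_append]
      congr 1
      have hne : (p :: q :: rest).take ((p :: q :: rest).length / 2) ≠ [] := by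
        intro hEq
        have hlen := congrArg List.length hEq
        simp only [List.length_take, List.length_nil, List.length_cons] at hlen
        omega
      rw [pvEnd_pos _ _ _ hne, pvShiftSum_eq_foldl]

-- ===== VERDICT (by name: the statement is the Claim_ definition above) =====
theorem safe_password_spec : Claim_equal_safe_password := by
  intro rotations start _
  show safe_password rotations start = safe_password_alt rotations start
  rw [safe_password, pvMain rotations.length rotations le_rfl]
  rfl
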